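-- pv_equiv track=rewrite | github.com/tchayintr/latte-ptm-ws | src/utils/word_oov_cws_metrics.py | _convert_labels_to_spans
-- ===== SOURCE A (Python) =====
-- from typing import Dict, List, Tuple
--
-- def _convert_labels_to_spans(labels: List[str]) -> List[Tuple]:
--     spans = []
--     if len(labels) == 0:
--         return spans
--     span = (0, 0)
--
--     for i, label in enumerate(labels):
--         if i == 0:
--             span = (0, 0)
--         elif label.upper() == 'B' or label.upper() == 'S':
--             spans.append(span)
--             span = (i, 0)
--         span = (span[0], span[1] + 1)
--     if span[1] != 0:
--         spans.append(span)
--     return spans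
-- ===== SOURCE B (Python) =====
-- def _convert_labels_to_spans(labels):
--     starts = [i for i, lab in enumerate(labels) if i == 0 or lab.upper() in ('B', 'S')]
--     return [(s, e - s) for s, e in zip(starts, starts[1:] + [len(labels)])]
-- ===== Notes on version B (the rewrite author's own statement) =====
-- stated objective: alternative
-- what changed: Replaces A's single incremental (start,length) accumulator loop with a two-phase decomposition: one pass collecting segment-start indices, then a zip of consecutive starts into (start, length) spans.
import Mathlib
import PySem

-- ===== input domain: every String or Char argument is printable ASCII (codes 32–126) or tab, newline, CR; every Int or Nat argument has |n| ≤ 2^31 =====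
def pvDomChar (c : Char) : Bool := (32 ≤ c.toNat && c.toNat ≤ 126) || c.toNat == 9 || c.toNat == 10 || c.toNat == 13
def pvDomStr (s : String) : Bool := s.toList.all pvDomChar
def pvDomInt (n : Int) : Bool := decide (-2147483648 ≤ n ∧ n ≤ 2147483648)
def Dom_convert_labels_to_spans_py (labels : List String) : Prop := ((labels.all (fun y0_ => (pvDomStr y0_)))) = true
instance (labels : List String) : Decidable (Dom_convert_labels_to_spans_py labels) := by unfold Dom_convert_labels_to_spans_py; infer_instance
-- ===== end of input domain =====

-- B replaces A's incremental span accumulator loop by a two-phase decomposition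
-- (collect segment-start indices, then zip consecutive starts into spans); objective: alternative.


-- ===== PORT A =====
/-- A's loop body (the statement of the `for` loop, factored for the fold). -/
def pvStepA (acc : List (Int × Int) × (Int × Int)) (il : Int × String) :
    List (Int × Int) × (Int × Int) :=
  let spans := acc.1
  let span := acc.2
  let (spans, span) :=
    if il.1 = 0 then (spans, ((0 : Int), (0 : Int)))
    else if PySem.Str.upper il.2 == "B" || PySem.Str.upper il.2 == "S" then
      (spans ++ [span], (il.1, (0 : Int)))
    else (spans, span)
  (spans, (span.1, span.2 + 1))

def convert_labels_to_spans_py (labels : List String) : List (Int × Int) :=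
  let spans : List (Int × Int) := []
  if labels.length = 0 then spans
  else
    let st :=
      (PySem.List.enumerate labels 0).foldl pvStepA (spans, ((0 : Int), (0 : Int)))
    if st.2.2 ≠ 0 then st.1 ++ [st.2] else st.1

-- ===== PORT B =====
def convert_labels_to_spans_py_alt (labels : List String) : List (Int × Int) :=
  let starts : List Int :=
    ((PySem.List.enumerate labels 0).filter
        (fun il => il.1 == 0 || (PySem.Str.upper il.2 == "B" || PySem.Str.upper il.2 == "S"))).map
      (fun il => il.1)
  (starts.zip (starts.drop 1 ++ [(labels.length : Int)])).map (fun se => (se.1, se.2 - se.1))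

-- ===== PRECONDITION & SPEC =====
def Spec_convert_labels_to_spans_py (labels : List String) (out : List (Int × Int)) : Prop := out = convert_labels_to_spans_py_alt labels
instance (labels : List String) (out : List (Int × Int)) : Decidable (Spec_convert_labels_to_spans_py labels out) := by unfold Spec_convert_labels_to_spans_py; infer_instance

-- ===== CLAIM (what is proved, stated in full; the proofs are below) =====
def Claim_equal_convert_labels_to_spans_py : Prop := ∀ (labels : List String), Dom_convert_labels_to_spans_py labels → Spec_convert_labels_to_spans_py labels (convert_labels_to_spans_py labels)

-- ===== LEMMAS AND PROOFS =====

/-- The boundary test shared by both programs. -/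
def pvIsB (l : String) : Bool := PySem.Str.upper l == "B" || PySem.Str.upper l == "S"

/-- Indices (starting at `j`) of the boundary labels in a list. -/
def pvBnd (j : Int) : List String → List Int
  | [] => []
  | l :: ls => if pvIsB l then j :: pvBnd (j + 1) ls else pvBnd (j + 1) ls

/-- Spans from a start `s`, further starts `ts`, and the final end `n`. -/
def pvMkSpans (s : Int) : List Int → Int → List (Int × Int)
  | [], n => [(s, n - s)]
  | t :: ts, n => (s, t - s) :: pvMkSpans t ts n

theorem pvLoopA (rest : List String) :
    ∀ (j s : Int) (spans : List (Int × Int)), 1 ≤ j → s < j →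
      (let st := (PySem.List.enumerate rest j).foldl pvStepA (spans, (s, j - s))
       st.1 ++ [st.2] = spans ++ pvMkSpans s (pvBnd j rest) (j + rest.length) ∧
       st.2.2 ≠ 0) := by
  induction rest with
  | nil =>
    intro j s spans hj hs
    refine ⟨?_, ?_⟩
    · simp [PySem.List.enumerate, pvMkSpans, pvBnd]
    · simp [PySem.List.enumerate]; omega
  | cons l ls ih =>
    intro j s spans hj hs
    rw [PySem.List.enumerate_cons]
    have hj0 : ¬ (j = 0) := by omega
    have hlen : ((l :: ls).length : Int) = j + 1 + (ls.length : Int) - j := by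
      simp [List.length_cons]; ring
    by_cases hb : pvIsB l
    · have hb' : (PySem.Str.upper l == "B" || PySem.Str.upper l == "S") = true := hb
      simp only [List.foldl_cons, pvStepA, hj0, hb', if_false, if_true, Bool.false_eq_true,
        ite_false, ite_true]
      have := ih (j + 1) j (spans ++ [(s, j - s)]) (by omega) (by omega)
      rw [show j + 1 - j = 0 + 1 from by ring] at this
      rcases this with ⟨h1, h2⟩
      refine ⟨?_, h2⟩
      rw [show j + ((l :: ls).length : Int) = j + 1 + (ls.length : Int) from by
        rw [hlen]; ring]
      rw [h1]
      simp [pvBnd, hb, pvMkSpans]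
    · have hb' : (PySem.Str.upper l == "B" || PySem.Str.upper l == "S") = false := by
        simpa [pvIsB] using hb
      simp only [List.foldl_cons, pvStepA, hj0, hb', if_false, if_true, Bool.false_eq_true,
        ite_false, ite_true]
      have := ih (j + 1) s spans (by omega) (by omega)
      rw [show j + 1 - s = j - s + 1 from by ring] at this
      rcases this with ⟨h1, h2⟩
      refine ⟨?_, h2⟩
      rw [show j + ((l :: ls).length : Int) = j + 1 + (ls.length : Int) from by
        rw [hlen]; ring]
      rw [h1]
      simp [pvBnd, hb]

theorem pvFilterB (ls : List String) :
    ∀ j : Int, 1 ≤ j →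
      ((PySem.List.enumerate ls j).filter
          (fun il => il.1 == 0 || (PySem.Str.upper il.2 == "B" || PySem.Str.upper il.2 == "S"))).map
        (fun il => il.1) = pvBnd j ls := by
  induction ls with
  | nil => intro j hj; simp [PySem.List.enumerate, pvBnd]
  | cons l ls ih =>
    intro j hj
    rw [PySem.List.enumerate_cons]
    have hj0 : (j == 0) = false := by simp; omega
    by_cases hb : pvIsB l
    · have hb' : (PySem.Str.upper l == "B" || PySem.Str.upper l == "S") = true := hb
      simp [hj0, hb', ih (j + 1) (by omega), pvBnd, hb]
    · have hb' : (PySem.Str.upper l == "B" || PySem.Str.upper l == "S") = false := by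
        simpa [pvIsB] using hb
      simp [hj0, hb', ih (j + 1) (by omega), pvBnd, hb]

theorem pvZipSpans (ts : List Int) :
    ∀ (s n : Int),
      ((s :: ts).zip ((s :: ts).drop 1 ++ [n])).map (fun se => (se.1, se.2 - se.1)) =
        pvMkSpans s ts n := by
  induction ts with
  | nil => intro s n; simp [pvMkSpans]
  | cons t ts ih =>
    intro s n
    have h := ih t n
    simp only [List.drop_succ_cons, List.drop_zero] at h
    simp only [List.drop_succ_cons, List.drop_zero, List.cons_append]
    rw [List.zip_cons_cons, List.map_cons, h]
    simp [pvMkSpans]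

-- ===== VERDICT (by name: the statement is the Claim_ definition above) =====
theorem convert_labels_to_spans_py_spec : Claim_equal_convert_labels_to_spans_py := by
  unfold Claim_equal_convert_labels_to_spans_py
  intro labels _
  unfold Spec_convert_labels_to_spans_py
  cases labels with
  | nil => rfl
  | cons l0 tl =>
    have hcast : ((l0 :: tl).length : Int) = 1 + (tl.length : Int) := by
      simp [List.length_cons]; ring
    have hB : convert_labels_to_spans_py_alt (l0 :: tl)
        = pvMkSpans 0 (pvBnd 1 tl) (1 + (tl.length : Int)) := by
      unfold convert_labels_to_spans_py_alt
      rw [PySem.List.enumerate_cons]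
      rw [List.filter_cons]
      norm_num
      rw [pvFilterB tl 1 (by omega)]
      rw [show ((tl.length : Int) + 1) = 1 + (tl.length : Int) from by ring]
      have hz := pvZipSpans (pvBnd 1 tl) 0 (1 + (tl.length : Int))
      simp only [List.drop_succ_cons, List.drop_zero] at hz
      exact hz
    have hloop := pvLoopA tl 1 0 [] (by omega) (by omega)
    rw [show (1 : Int) - 0 = 1 from by ring] at hloop
    simp only at hloop
    rcases hloop with ⟨h1, h2⟩
    have hA : convert_labels_to_spans_py (l0 :: tl)
        = pvMkSpans 0 (pvBnd 1 tl) (1 + (tl.length : Int)) := by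
      unfold convert_labels_to_spans_py
      rw [PySem.List.enumerate_cons]
      rw [if_neg (by simp [List.length_cons])]
      rw [List.foldl_cons]
      have hstep : pvStepA ([], (0, 0)) (0, l0) = ([], (0, 1)) := by
        simp [pvStepA]
      rw [hstep]
      simp only [zero_add]
      rw [if_pos h2, h1]
      simp
    rw [hA, hB]
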